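-- pv_equiv track=rewrite | github.com/yezz123/authx | authx/_internal/_scopes.py | has_required_scopes
-- ===== SOURCE A (Python) =====
-- from collections.abc import Sequence
--
-- def match_scope(required: str, provided: str) -> bool:
--     """Check if a provided scope matches a required scope.
--
--     Supports wildcard matching where a scope ending with ":*" matches
--     any scope under that namespace.
--
--     Args:
--         required: The scope that is required (e.g., "users:read").
--         provided: The scope that was provided in the token (e.g., "users:*").
--
--     Returns:
--         True if the provided scope satisfies the required scope.
--
--     Examples:
--         >>> match_scope("read", "read")
--         True
--         >>> match_scope("users:read", "users:*")
--         True
--         >>> match_scope("users:read", "admin:*")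
--         False
--         >>> match_scope("admin", "admin:*")
--         True
--         >>> match_scope("admin:users:edit", "admin:*")
--         True
--     """
--     # Exact match
--     if required == provided:
--         return True
--
--     # Wildcard match: "admin:*" should match "admin", "admin:users", "admin:users:edit"
--     if provided.endswith(":*"):
--         prefix = provided[:-1]  # Remove the "*" to get "admin:"
--         namespace = provided[:-2]  # Remove ":*" to get "admin"
--         # Match if required starts with "admin:" or equals "admin"
--         return required.startswith(prefix) or required == namespace
--
--     return False
--
-- def has_required_scopes(
--     required: Sequence[str],
--     provided: Sequence[str] | None,
--     all_required: bool = True,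
-- ) -> bool:
--     """Check if the provided scopes satisfy the required scopes.
--
--     Args:
--         required: List of scopes that are required.
--         provided: List of scopes that were provided in the token.
--         all_required: If True, all required scopes must be satisfied (AND logic).
--                       If False, at least one required scope must be satisfied (OR logic).
--
--     Returns:
--         True if the scope requirements are satisfied.
--
--     Examples:
--         >>> has_required_scopes(["read"], ["read", "write"], all_required=True)
--         True
--         >>> has_required_scopes(["read", "admin"], ["read"], all_required=True)
--         False
--         >>> has_required_scopes(["read", "admin"], ["read"], all_required=False)
--         True
--         >>> has_required_scopes(["users:read"], ["users:*"], all_required=True)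
--         True
--     """
--     if provided is None:
--         return len(required) == 0
--
--     def scope_satisfied(req: str) -> bool:
--         """Check if a single required scope is satisfied by any provided scope."""
--         return any(match_scope(req, prov) for prov in provided)
--
--     if all_required:
--         # All required scopes must be satisfied
--         return all(scope_satisfied(req) for req in required)
--     else:
--         # At least one required scope must be satisfied
--         return any(scope_satisfied(req) for req in required)
-- ===== SOURCE B (Python) =====
-- def has_required_scopes(required, provided, all_required=True):
--     if provided is None:
--         return not required
--
--     exact = set(provided)
--     wild = {p[:-2] for p in provided if p.endswith(":*")}
--
--     def scope_ok(req):
--         if req in exact: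
--             return True
--         prefix = None
--         for part in req.split(":"):
--             prefix = part if prefix is None else prefix + ":" + part
--             if prefix in wild:
--                 return True
--         return False
--
--     if all_required:
--         return all(scope_ok(req) for req in required)
--     return any(scope_ok(req) for req in required)
-- ===== Notes on version B (the rewrite author's own statement) =====
-- stated objective: alternative
-- what changed: Instead of testing every required scope against every provided scope with match_scope, B precomputes from provided a set of exact scopes and a set of wildcard namespaces, and checks each required scope by walking the colon-joined prefixes of its split(':') parts and testing set membership.
import Mathlib
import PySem

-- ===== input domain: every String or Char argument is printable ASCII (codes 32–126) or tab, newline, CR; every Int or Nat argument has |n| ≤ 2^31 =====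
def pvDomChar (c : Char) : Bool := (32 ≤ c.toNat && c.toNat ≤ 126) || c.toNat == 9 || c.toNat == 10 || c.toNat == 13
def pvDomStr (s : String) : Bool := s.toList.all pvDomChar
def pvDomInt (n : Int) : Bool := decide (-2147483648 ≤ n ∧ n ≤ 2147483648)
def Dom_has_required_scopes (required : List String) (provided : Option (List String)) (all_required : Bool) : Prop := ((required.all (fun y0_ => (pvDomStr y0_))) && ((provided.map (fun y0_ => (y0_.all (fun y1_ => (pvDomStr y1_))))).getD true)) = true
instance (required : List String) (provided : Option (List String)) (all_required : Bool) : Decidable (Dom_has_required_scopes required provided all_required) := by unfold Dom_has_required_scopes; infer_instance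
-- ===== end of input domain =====

-- B replaces A's scan of all provided scopes per required scope by two sets precomputed once
-- from `provided` (exact scopes / wildcard namespaces) plus a walk over the colon-joined
-- prefixes of each required scope's split(':') parts (objective: alternative; same return value).

-- ===== PORT A =====
def match_scope (required : String) (provided : String) : Bool :=
  if required == provided then true
  else if PySem.Str.endswith provided ":*" then
    -- prefix = provided[:-1], namespace = provided[:-2]
    (PySem.Str.startswith required (PySem.Str.slice provided none (some (-1)))
      || (required == PySem.Str.slice provided none (some (-2))))
  else false

def has_required_scopes (required : List String) (provided : Option (List String)) (all_required : Bool) : Bool :=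
  match provided with
  | none => required.length == 0
  | some ps =>
    -- scope_satisfied(req) = any(match_scope(req, prov) for prov in provided)
    if all_required then required.all (fun req => ps.any (fun prov => match_scope req prov))
    else required.any (fun req => ps.any (fun prov => match_scope req prov))

-- ===== PORT B =====
-- the `for part in req.split(":")` loop of scope_ok, threading the accumulated prefix
-- (prefixes kept as List Char so the proofs never touch Lean's opaque String.append)
def scopeLoop (wild : PySem.Set (List Char)) (pre? : Option (List Char)) : List (List Char) → Bool
  | [] => false
  | part :: rest =>
    let pre := match pre? with
      | none => part
      | some a => a ++ ':' :: part          -- prefix + ":" + part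
    if PySem.Set.contains wild pre then true else scopeLoop wild (some pre) rest

def has_required_scopes_alt (required : List String) (provided : Option (List String)) (all_required : Bool) : Bool :=
  match provided with
  | none => required.isEmpty
  | some ps =>
    let exact : PySem.Set String := PySem.Set.ofList ps
    let wild : PySem.Set (List Char) := PySem.Set.ofList (ps.filterMap (fun p =>
      if PySem.Str.endswith p ":*" then some (PySem.Str.slice p none (some (-2))).toList else none))
    let ok : String → Bool := fun req =>
      if PySem.Set.contains exact req then true
      else scopeLoop wild none (PySem.Chars.splitOn req.toList [':'])
    if all_required then required.all ok else required.any ok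

-- ===== PRECONDITION & SPEC =====
def Spec_has_required_scopes (required : List String) (provided : Option (List String)) (all_required : Bool) (out : Bool) : Prop := out = has_required_scopes_alt required provided all_required
instance (required : List String) (provided : Option (List String)) (all_required : Bool) (out : Bool) : Decidable (Spec_has_required_scopes required provided all_required out) := by unfold Spec_has_required_scopes; infer_instance

-- ===== CLAIM (what is proved, stated in full; the proofs are below) =====
def Claim_equal_has_required_scopes : Prop := ∀ (required : List String) (provided : Option (List String)) (all_required : Bool), Dom_has_required_scopes required provided all_required → Spec_has_required_scopes required provided all_required (has_required_scopes required provided all_required)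

-- ===== LEMMAS AND PROOFS =====

-- reference recursion for splitting on a single character
def splitCh (c : Char) : List Char → List (List Char)
  | [] => [[]]
  | d :: rest =>
    if d = c then [] :: splitCh c rest
    else
      match splitCh c rest with
      | [] => [[d]]
      | p :: ps => (d :: p) :: ps

-- apply a function to the head of a list only
def mapHead (f : List Char → List Char) : List (List Char) → List (List Char)
  | [] => []
  | p :: ps => f p :: ps

-- all colon-boundary prefixes of cs, plus cs itself
def cp : List Char → List (List Char)
  | [] => [[]]
  | d :: rest =>
    if d = ':' then [] :: (cp rest).map (fun m => ':' :: m)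
    else (cp rest).map (fun m => d :: m)

-- the accumulated prefix seen by scopeLoop
def ext : Option (List Char) → List Char → List Char
  | none, m => m
  | some a, m => a ++ ':' :: m

lemma ext_append (a : Option (List Char)) (m k : List Char) :
    ext a (m ++ k) = ext a m ++ k := by
  cases a <;> simp [ext]

lemma mapHead_id (xs : List (List Char)) : mapHead (fun p => [] ++ p) xs = xs := by
  cases xs <;> simp [mapHead]

lemma mapHead_mapHead (f g : List Char → List Char) (xs : List (List Char)) :
    mapHead f (mapHead g xs) = mapHead (fun p => f (g p)) xs := by
  cases xs <;> simp [mapHead]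

lemma splitCh_ne_nil (c : Char) (cs : List Char) : splitCh c cs ≠ [] := by
  cases cs with
  | nil => simp [splitCh]
  | cons d rest =>
    by_cases h : d = c
    · simp [splitCh, h]
    · cases hs : splitCh c rest <;> simp [splitCh, h, hs]

lemma go_eq_splitCh (c : Char) (l : List Char) : ∀ (fuel : Nat) (cur : List Char) (acc : List (List Char)),
    l.length ≤ fuel →
    PySem.Chars.splitOn.go [c] fuel l cur acc
      = acc.reverse ++ mapHead (fun p => cur.reverse ++ p) (splitCh c l) := by
  induction l with
  | nil =>
    intro fuel cur acc _
    cases fuel <;> simp [PySem.Chars.splitOn.go, splitCh, mapHead]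
  | cons d rest ih =>
    intro fuel cur acc hfuel
    cases fuel with
    | zero => simp at hfuel
    | succ f =>
      have hrest : rest.length ≤ f := by simpa using hfuel
      by_cases hdc : c = d
      · subst hdc
        have hpre : [c].isPrefixOf (c :: rest) = true := by simp [List.isPrefixOf]
        rw [show PySem.Chars.splitOn.go [c] (f + 1) (c :: rest) cur acc
              = PySem.Chars.splitOn.go [c] f (List.drop [c].length (c :: rest)) [] (cur.reverse :: acc) from by
            rw [PySem.Chars.splitOn.go]; simp [hpre]]
        simp only [List.length_singleton, List.drop_succ_cons, List.drop_zero]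
        rw [ih f [] (cur.reverse :: acc) hrest]
        have : mapHead (fun p => [].reverse ++ p) (splitCh c rest) = splitCh c rest := by
          simpa using mapHead_id (splitCh c rest)
        rw [this]
        simp [splitCh, mapHead]
      · have hpre : [c].isPrefixOf (d :: rest) = false := by
          simp [List.isPrefixOf]; exact fun h => hdc (by simpa using h)
        rw [show PySem.Chars.splitOn.go [c] (f + 1) (d :: rest) cur acc
              = PySem.Chars.splitOn.go [c] f rest (d :: cur) acc from by
            rw [PySem.Chars.splitOn.go]; simp [hpre]]
        rw [ih f (d :: cur) acc hrest]
        have hsp : splitCh c (d :: rest) = mapHead (fun p => d :: p) (splitCh c rest) := by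
          cases h : splitCh c rest with
          | nil => exact absurd h (splitCh_ne_nil c rest)
          | cons p ps => simp [splitCh, Ne.symm hdc, h, mapHead]
        rw [hsp, mapHead_mapHead]
        simp

lemma splitOn_eq_splitCh (c : Char) (cs : List Char) :
    PySem.Chars.splitOn cs [c] = splitCh c cs := by
  unfold PySem.Chars.splitOn
  rw [go_eq_splitCh c cs (cs.length + 1) [] [] (by omega)]
  simpa using mapHead_id (splitCh c cs)

lemma splitCh_cons_ne (c d : Char) (rest : List Char) (h : d ≠ c) :
    splitCh c (d :: rest) = mapHead (fun p => d :: p) (splitCh c rest) := by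
  cases hs : splitCh c rest with
  | nil => exact absurd hs (splitCh_ne_nil c rest)
  | cons p ps => simp [splitCh, h, hs, mapHead]

lemma mem_cp (n cs : List Char) : n ∈ cp cs ↔ n ++ [':'] <+: cs ∨ n = cs := by
  induction cs generalizing n with
  | nil => simp [cp]
  | cons d rest ih =>
    by_cases hd : d = ':'
    · subst hd
      rw [show cp (':' :: rest) = [] :: (cp rest).map (fun m => ':' :: m) from by simp [cp]]
      cases n with
      | nil => simp [List.cons_prefix_cons]
      | cons a m =>
        simp only [List.mem_cons, List.mem_map, List.cons_append, List.cons_prefix_cons,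
          List.cons.injEq, ih]
        constructor
        · rintro (h | ⟨m', hm', rfl, rfl⟩)
          · exact absurd h (by simp)
          · rcases hm' with h | rfl
            · exact Or.inl ⟨rfl, h⟩
            · exact Or.inr ⟨rfl, rfl⟩
        · rintro (⟨rfl, h⟩ | ⟨rfl, rfl⟩)
          · exact Or.inr ⟨m, Or.inl h, rfl, rfl⟩
          · exact Or.inr ⟨m, Or.inr rfl, rfl, rfl⟩
    · rw [show cp (d :: rest) = (cp rest).map (fun m => d :: m) from by simp [cp, hd]]
      cases n with
      | nil =>
        simp only [List.mem_map, List.nil_append, List.cons_prefix_cons]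
        constructor
        · rintro ⟨m, -, h⟩; exact absurd h (by simp)
        · rintro (⟨h, -⟩ | h)
          · exact absurd h.symm hd
          · exact absurd h (by simp)
      | cons a m =>
        simp only [List.mem_map, List.cons_append, List.cons_prefix_cons, List.cons.injEq, ih]
        constructor
        · rintro ⟨m', hm', rfl, rfl⟩
          rcases hm' with h | rfl
          · exact Or.inl ⟨rfl, h⟩
          · exact Or.inr ⟨rfl, rfl⟩
        · rintro (⟨rfl, h⟩ | ⟨rfl, rfl⟩)
          · exact ⟨m, Or.inl h, rfl, rfl⟩
          · exact ⟨m, Or.inr rfl, rfl, rfl⟩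

lemma scopeLoop_pre (w : PySem.Set (List Char)) (a : Option (List Char)) (part : List Char)
    (rest : List (List Char)) :
    scopeLoop w a (part :: rest)
      = (if PySem.Set.contains w (ext a part) then true
         else scopeLoop w (some (ext a part)) rest) := by
  cases a <;> rfl

lemma scopeLoop_eq (w : PySem.Set (List Char)) (cs : List Char) :
    ∀ (b : List Char) (a : Option (List Char)),
    scopeLoop w a (mapHead (fun p => b ++ p) (splitCh ':' cs))
      = (cp cs).any (fun n => PySem.Set.contains w (ext a (b ++ n))) := by
  induction cs with
  | nil =>
    intro b a
    simp only [splitCh, mapHead, cp, scopeLoop_pre, scopeLoop, List.any_cons, List.any_nil]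
    cases h : PySem.Set.contains w (ext a (b ++ [])) <;> simp_all
  | cons d rest ih =>
    intro b a
    by_cases hd : d = ':'
    · subst hd
      rw [show splitCh ':' (':' :: rest) = [] :: splitCh ':' rest from by simp [splitCh]]
      rw [show mapHead (fun p => b ++ p) ([] :: splitCh ':' rest)
            = b :: mapHead (fun p => [] ++ p) (splitCh ':' rest) from by
          rw [mapHead_id]; simp [mapHead]]
      rw [scopeLoop_pre, ih [] (some (ext a b))]
      rw [show cp (':' :: rest) = [] :: (cp rest).map (fun m => ':' :: m) from by simp [cp]]
      have h3 : ∀ n : List Char, ext (some (ext a b)) ([] ++ n) = ext a b ++ ':' :: n :=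
        fun n => rfl
      have hmap : ((cp rest).map (fun m => ':' :: m)).any
            (fun n => PySem.Set.contains w (ext a (b ++ n)))
          = (cp rest).any (fun n => PySem.Set.contains w (ext a b ++ ':' :: n)) := by
        rw [List.any_map]
        congr 1
        funext n
        show PySem.Set.contains w (ext a (b ++ ':' :: n)) = _
        rw [ext_append a b (':' :: n)]
      simp only [h3, List.any_cons, hmap, List.append_nil]
      cases PySem.Set.contains w (ext a b) <;> simp
    · rw [splitCh_cons_ne ':' d rest hd, mapHead_mapHead]
      rw [show (fun p => b ++ d :: p) = (fun p => (b ++ [d]) ++ p) from by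
          funext p; simp]
      rw [ih (b ++ [d]) a]
      rw [show cp (d :: rest) = (cp rest).map (fun m => d :: m) from by simp [cp, hd]]
      simp only [List.any_map]
      congr 1
      funext n
      rw [List.append_assoc]
      rfl

lemma scopeLoop_split (w : PySem.Set (List Char)) (req : String) :
    scopeLoop w none (PySem.Chars.splitOn req.toList [':'])
      = (cp req.toList).any (fun n => PySem.Set.contains w n) := by
  rw [splitOn_eq_splitCh]
  rw [show splitCh ':' req.toList = mapHead (fun p => [] ++ p) (splitCh ':' req.toList) from
    (mapHead_id _).symm]
  rw [scopeLoop_eq w req.toList [] none]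
  simp [ext]

lemma startswith_true_iff (s p : String) :
    PySem.Str.startswith s p = true ↔ p.toList <+: s.toList := by
  simp [PySem.Chars.startswith_iff]

lemma endswith_true_iff (s p : String) :
    PySem.Str.endswith s p = true ↔ p.toList <:+ s.toList := by
  simp [PySem.Chars.endswith_iff]

lemma toList_slice_neg_two (p : String) :
    (PySem.Str.slice p none (some (-2))).toList = p.toList.take (p.toList.length - 2) := by
  rw [PySem.Str.toList_slice, PySem.Chars.slice_eq_listSlice,
    PySem.List.slice_to_neg_ofNat p.toList 2 (by norm_num)]

lemma str_eq_iff_toList (a b : String) : a = b ↔ a.toList = b.toList := by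
  constructor
  · intro h; rw [h]
  · intro h
    have := congrArg String.ofList h
    simpa using this

lemma match_scope_iff (req p : String) :
    match_scope req p = true ↔
      req = p ∨ (PySem.Str.endswith p ":*" = true ∧
        (PySem.Str.slice p none (some (-2))).toList ∈ cp req.toList) := by
  unfold match_scope
  by_cases hqp : req = p
  · simp [hqp]
  · rw [if_neg (by simpa using hqp)]
    by_cases he : PySem.Str.endswith p ":*" = true
    · rw [if_pos he]
      obtain ⟨t, ht⟩ := (endswith_true_iff p ":*").mp he
      have ht' : t ++ [':', '*'] = p.toList := by simpa using ht
      have hpre : (PySem.Str.slice p none (some (-1))).toList = t ++ [':'] := by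
        rw [PySem.Str.slice_to_neg_one, ← ht']; simp
      have hns : (PySem.Str.slice p none (some (-2))).toList = t := by
        rw [toList_slice_neg_two, ← ht']; simp
      rw [mem_cp, hns]
      constructor
      · intro h
        by_cases hs : PySem.Str.startswith req (PySem.Str.slice p none (some (-1))) = true
        · refine Or.inr ⟨he, Or.inl ?_⟩
          have := (startswith_true_iff req _).mp hs
          rwa [hpre] at this
        · simp only [Bool.not_eq_true] at hs
          simp only [hs, Bool.false_or] at h
          refine Or.inr ⟨he, Or.inr ?_⟩
          have : req = PySem.Str.slice p none (some (-2)) := beq_iff_eq.mp h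
          rw [← hns, ((str_eq_iff_toList _ _).mp this)]
      · rintro (rfl | ⟨-, hpref | heq⟩)
        · exact absurd rfl hqp
        · have hs := (startswith_true_iff req _).mpr (hpre ▸ hpref)
          simp only [hs, Bool.true_or]
        · have hb : (req == PySem.Str.slice p none (some (-2))) = true := by
            refine beq_iff_eq.mpr ?_
            rw [str_eq_iff_toList, hns, heq]
          simp only [hb, Bool.or_true]
    · rw [if_neg he]
      constructor
      · intro h; exact absurd h (by simp)
      · rintro (rfl | ⟨hee, -⟩)
        · exact absurd rfl hqp
        · exact absurd hee he

lemma contains_ofList_str (x : String) (l : List String) :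
    PySem.Set.contains (PySem.Set.ofList l) x = true ↔ x ∈ l := by
  simp [pysem]

lemma contains_ofList_chars (x : List Char) (l : List (List Char)) :
    PySem.Set.contains (PySem.Set.ofList l) x = true ↔ x ∈ l := by
  simp [pysem]

lemma sat_eq (req : String) (ps : List String) :
    ps.any (fun prov => match_scope req prov)
      = (if PySem.Set.contains (PySem.Set.ofList ps) req then true
         else scopeLoop (PySem.Set.ofList (ps.filterMap (fun p =>
            if PySem.Str.endswith p ":*" then some (PySem.Str.slice p none (some (-2))).toList
            else none))) none (PySem.Chars.splitOn req.toList [':'])) := by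
  rw [scopeLoop_split]
  rw [show ∀ (c x : Bool), (if c = true then true else x) = (c || x) from by decide]
  rw [Bool.eq_iff_iff]
  simp only [List.any_eq_true, Bool.or_eq_true, match_scope_iff, contains_ofList_str,
    contains_ofList_chars, List.mem_filterMap, Option.ite_none_right_eq_some,
    Option.some.injEq]
  constructor
  · rintro ⟨p, hp, (rfl | ⟨he, hm⟩)⟩
    · exact Or.inl hp
    · exact Or.inr ⟨_, hm, ⟨p, hp, he, rfl⟩⟩
  · rintro (h | ⟨n, hn, ⟨p, hp, he, rfl⟩⟩)
    · exact ⟨req, h, Or.inl rfl⟩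
    · exact ⟨p, hp, Or.inr ⟨he, hn⟩⟩

-- ===== VERDICT (by name: the statement is the Claim_ definition above) =====
theorem has_required_scopes_spec : Claim_equal_has_required_scopes := by
  intro required provided all_required _
  unfold Spec_has_required_scopes has_required_scopes has_required_scopes_alt
  cases provided with
  | none => cases required <;> rfl
  | some ps =>
    simp only
    have h : (fun req => ps.any (fun prov => match_scope req prov))
        = (fun req =>
            if PySem.Set.contains (PySem.Set.ofList ps) req then true
            else scopeLoop (PySem.Set.ofList (ps.filterMap (fun p =>
              if PySem.Str.endswith p ":*" then some (PySem.Str.slice p none (some (-2))).toList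
              else none))) none (PySem.Chars.splitOn req.toList [':'])) :=
      funext (fun req => sat_eq req ps)
    rw [h]
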